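-- pv_equiv track=rewrite | github.com/pypi-data/pypi-mirror-176 | packages/ParserLexicalAnalyzer/ParserLexicalAnalyzer-1.1.1-py3-none-any.whl/ParserLexicalAnalyzer/SimpleExpressionParser/LexicalAnalyzer.py | is_symbol
-- ===== SOURCE A (Python) =====
-- def is_symbol(string):
--     # (, )
--     st = 0
--     for i in range(0, len(string)):
--         if st == 0:
--             if string[i] == "(" or string[i] == ")":
--                 st = 1
--             else:
--                 return False
--         elif st == 1:
--             return True
--     return False
-- ===== SOURCE B (Python) =====
-- def is_symbol(string):
--     return len(string) >= 2 and string[0] in ('(', ')')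
-- ===== Notes on version B (the rewrite author's own statement) =====
-- stated objective: simpler
-- what changed: Replaced the two-state character-scanning loop with a single closed-form boolean: length >= 2 and the first character is '(' or ')'.
import Mathlib
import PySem

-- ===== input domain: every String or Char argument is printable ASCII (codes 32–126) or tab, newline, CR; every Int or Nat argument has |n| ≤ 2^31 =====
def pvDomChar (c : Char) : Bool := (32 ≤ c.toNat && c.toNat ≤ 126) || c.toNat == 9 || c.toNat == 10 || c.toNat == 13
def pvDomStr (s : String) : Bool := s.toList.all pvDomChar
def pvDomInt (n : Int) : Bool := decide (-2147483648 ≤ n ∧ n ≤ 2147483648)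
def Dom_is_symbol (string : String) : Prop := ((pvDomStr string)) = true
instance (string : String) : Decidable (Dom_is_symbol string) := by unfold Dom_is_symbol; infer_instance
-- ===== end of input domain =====

-- B replaces A's two-state scanning loop by one closed-form boolean (simpler); behaviour is identical.

-- ===== PORT A =====
-- A's loop over string indices with state st: transliterated as structural recursion over the chars, carrying st.
def isSymbolLoop (cs : List Char) (st : Int) : Bool :=
  match cs with
  | [] => false
  | c :: rest =>
    if st = 0 then
      if c = '(' ∨ c = ')' then isSymbolLoop rest 1
      else false
    else true

def is_symbol (string : String) : Bool := isSymbolLoop string.toList 0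

-- ===== PORT B =====
def is_symbol_alt (string : String) : Bool :=
  decide (2 ≤ PySem.Str.len string) &&
    (match PySem.Str.pyGet? string 0 with
     | some c => decide (c = '(' ∨ c = ')')
     | none => false)

-- ===== PRECONDITION & SPEC =====
def Spec_is_symbol (string : String) (out : Bool) : Prop := out = is_symbol_alt string
instance (string : String) (out : Bool) : Decidable (Spec_is_symbol string out) := by unfold Spec_is_symbol; infer_instance

-- ===== CLAIM (what is proved, stated in full; the proofs are below) =====
def Claim_equal_is_symbol : Prop := ∀ (string : String), Dom_is_symbol string → Spec_is_symbol string (is_symbol string)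

-- ===== LEMMAS AND PROOFS =====
theorem isSymbolLoop_closed (l : List Char) :
    isSymbolLoop l 0 =
      (decide (2 ≤ (l.length : Int)) &&
        match l[0]? with
        | some c => decide (c = '(' ∨ c = ')')
        | none => false) := by
  rcases l with _ | ⟨c, _ | ⟨d, rest⟩⟩
  · simp [isSymbolLoop]
  · by_cases hc : c = '(' ∨ c = ')' <;> simp [isSymbolLoop, hc]
  · by_cases hc : c = '(' ∨ c = ')' <;> simp [isSymbolLoop, hc] <;> omega
theorem is_symbol_eq_alt (string : String) : is_symbol string = is_symbol_alt string := by
  have h0 : PySem.Str.pyGet? string 0 = string.toList[(0 : Nat)]? :=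
    PySem.Str.pyGet?_natCast string 0
  simp only [is_symbol, is_symbol_alt, PySem.Str.len_eq, h0]
  exact isSymbolLoop_closed string.toList

-- ===== VERDICT (by name: the statement is the Claim_ definition above) =====
theorem is_symbol_spec : Claim_equal_is_symbol := by
  intro s _
  exact is_symbol_eq_alt s
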